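-- pv_equiv track=rewrite | github.com/Habetyan/code_debugging_swe | src/pipelines/agentic.py | _convert_diff_to_search_replace
-- ===== SOURCE A (Python) =====
-- def _convert_diff_to_search_replace(diff_text: str) -> str:
--     """Convert unified diff format to SEARCH/REPLACE format for examples.
--
--     This ensures training examples shown to the LLM use the same format
--     we're asking for in the output.
--     """
--     if not diff_text or '@@' not in diff_text:
--         return diff_text
--
--     result_blocks = []
--     lines = diff_text.split('\n')
--
--     i = 0
--     while i < len(lines):
--         # Skip file headers and find hunk headers
--         if lines[i].startswith('@@'):
--             search_lines = []
--             replace_lines = []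
--             i += 1
--
--             # Process hunk content
--             while i < len(lines) and not lines[i].startswith('@@') and not lines[i].startswith('diff '):
--                 line = lines[i]
--                 if line.startswith('-') and not line.startswith('---'):
--                     # Removed line - goes in SEARCH only
--                     search_lines.append(line[1:])
--                 elif line.startswith('+') and not line.startswith('+++'):
--                     # Added line - goes in REPLACE only
--                     replace_lines.append(line[1:])
--                 elif line.startswith(' '):
--                     # Context line - goes in both
--                     search_lines.append(line[1:])
--                     replace_lines.append(line[1:])
--                 elif line and not line.startswith(('---', '+++')):
--                     # Handle lines without prefix (some diff formats)
--                     search_lines.append(line)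
--                     replace_lines.append(line)
--                 i += 1
--
--             if search_lines or replace_lines:
--                 block = "<<<< SEARCH\n"
--                 block += '\n'.join(search_lines)
--                 block += "\n====\n"
--                 block += '\n'.join(replace_lines)
--                 block += "\n>>>> REPLACE"
--                 result_blocks.append(block)
--         else:
--             i += 1
--
--     return '\n\n'.join(result_blocks) if result_blocks else diff_text
-- ===== SOURCE B (Python) =====
-- def _search_line(line):
--     """SEARCH-side content of one hunk body line, or None."""
--     if line.startswith('-') and not line.startswith('---'):
--         return line[1:]
--     if line.startswith('+') and not line.startswith('+++'):
--         return None
--     if line.startswith(' '):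
--         return line[1:]
--     if line and not line.startswith(('---', '+++')):
--         return line
--     return None
--
--
-- def _replace_line(line):
--     """REPLACE-side content of one hunk body line, or None."""
--     if line.startswith('-') and not line.startswith('---'):
--         return None
--     if line.startswith('+') and not line.startswith('+++'):
--         return line[1:]
--     if line.startswith(' '):
--         return line[1:]
--     if line and not line.startswith(('---', '+++')):
--         return line
--     return None
--
--
-- def _convert_diff_to_search_replace(diff_text: str) -> str:
--     """Convert unified diff format to SEARCH/REPLACE format for examples."""
--     if not diff_text or '@@' not in diff_text:
--         return diff_text
--
--     # Pass 1: segment the lines into hunk bodies.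
--     hunks = []
--     current = None
--     for line in diff_text.split('\n'):
--         if line.startswith('@@'):
--             current = []
--             hunks.append(current)
--         elif line.startswith('diff '):
--             current = None
--         elif current is not None:
--             current.append(line)
--
--     # Pass 2: render each non-empty hunk as a SEARCH/REPLACE block.
--     blocks = []
--     for hunk in hunks:
--         search = [s for s in map(_search_line, hunk) if s is not None]
--         replace = [s for s in map(_replace_line, hunk) if s is not None]
--         if search or replace:
--             blocks.append("<<<< SEARCH\n" + '\n'.join(search)
--                           + "\n====\n" + '\n'.join(replace) + "\n>>>> REPLACE")
--
--     return '\n\n'.join(blocks) if blocks else diff_text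
-- ===== Notes on version B (the rewrite author's own statement) =====
-- stated objective: simpler
-- what changed: Replaced A's single cursor-driven while-loop (with a nested inner while advancing the same index) by two independent passes: first segment the split lines into hunk bodies with a fold, then render each non-empty body into a SEARCH/REPLACE block via two per-line classifier functions.
import Mathlib
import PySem

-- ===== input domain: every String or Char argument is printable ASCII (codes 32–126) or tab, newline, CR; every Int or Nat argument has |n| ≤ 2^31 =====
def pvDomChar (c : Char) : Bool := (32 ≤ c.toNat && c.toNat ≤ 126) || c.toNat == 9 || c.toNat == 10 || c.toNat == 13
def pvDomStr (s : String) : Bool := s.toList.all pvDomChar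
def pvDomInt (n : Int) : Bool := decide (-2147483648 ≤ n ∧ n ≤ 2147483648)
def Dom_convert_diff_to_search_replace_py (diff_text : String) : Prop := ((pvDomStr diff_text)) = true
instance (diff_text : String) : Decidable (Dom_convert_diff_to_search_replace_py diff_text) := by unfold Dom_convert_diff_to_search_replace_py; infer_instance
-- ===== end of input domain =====

-- B re-decomposes A's single cursor-driven while-loop into two passes (segment the lines
-- into hunk bodies, then render each body); objective: simpler, same asymptotic cost.

-- ===== PORT A =====
-- inner while loop: consume hunk body lines from the cursor, accumulating search/replace
def pvAInner : List String → List String → List String → List String × List String × List String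
  | [], search, replace => (search, replace, [])
  | l :: rest, search, replace =>
    if PySem.Str.startswith l "@@" || PySem.Str.startswith l "diff " then
      (search, replace, l :: rest)
    else if PySem.Str.startswith l "-" && !PySem.Str.startswith l "---" then
      pvAInner rest (search ++ [PySem.Str.slice l (some 1) none]) replace
    else if PySem.Str.startswith l "+" && !PySem.Str.startswith l "+++" then
      pvAInner rest search (replace ++ [PySem.Str.slice l (some 1) none])
    else if PySem.Str.startswith l " " then
      pvAInner rest (search ++ [PySem.Str.slice l (some 1) none]) (replace ++ [PySem.Str.slice l (some 1) none])
    else if l != "" && !(PySem.Str.startswith l "---" || PySem.Str.startswith l "+++") then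
      pvAInner rest (search ++ [l]) (replace ++ [l])
    else
      pvAInner rest search replace

-- termination helper for the outer loop (the cursor never moves backwards)
theorem pvAInner_len (ls : List String) (s r : List String) :
    (pvAInner ls s r).2.2.length ≤ ls.length := by
  induction ls generalizing s r with
  | nil => simp [pvAInner]
  | cons l rest ih =>
    simp only [pvAInner]
    split_ifs <;> first
      | exact Nat.le_succ_of_le (ih _ _)
      | simp

-- outer while loop over the cursor
def pvAOuter (ls : List String) (blocks : List String) : List String :=
  match ls with
  | [] => blocks
  | l :: rest =>
    if PySem.Str.startswith l "@@" then
      let t := pvAInner rest [] []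
      let blocks' :=
        if t.1 ≠ [] ∨ t.2.1 ≠ [] then
          blocks ++ ["<<<< SEARCH\n" ++ PySem.Str.join "\n" t.1 ++ "\n====\n"
            ++ PySem.Str.join "\n" t.2.1 ++ "\n>>>> REPLACE"]
        else blocks
      pvAOuter t.2.2 blocks'
    else
      pvAOuter rest blocks
termination_by ls.length
decreasing_by
  · have := pvAInner_len rest [] []; simp; omega
  · simp

def convert_diff_to_search_replace_py (diff_text : String) : String :=
  if diff_text == "" || !PySem.Str.isIn "@@" diff_text then diff_text
  else
    let blocks := pvAOuter ((PySem.Str.split? diff_text "\n").getD []) []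
    if blocks ≠ [] then PySem.Str.join "\n\n" blocks else diff_text

-- ===== PORT B =====
def pvSearchLine (line : String) : Option String :=
  if PySem.Str.startswith line "-" && !PySem.Str.startswith line "---" then
    some (PySem.Str.slice line (some 1) none)
  else if PySem.Str.startswith line "+" && !PySem.Str.startswith line "+++" then
    none
  else if PySem.Str.startswith line " " then
    some (PySem.Str.slice line (some 1) none)
  else if line != "" && !(PySem.Str.startswith line "---" || PySem.Str.startswith line "+++") then
    some line
  else
    none

def pvReplaceLine (line : String) : Option String :=
  if PySem.Str.startswith line "-" && !PySem.Str.startswith line "---" then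
    none
  else if PySem.Str.startswith line "+" && !PySem.Str.startswith line "+++" then
    some (PySem.Str.slice line (some 1) none)
  else if PySem.Str.startswith line " " then
    some (PySem.Str.slice line (some 1) none)
  else if line != "" && !(PySem.Str.startswith line "---" || PySem.Str.startswith line "+++") then
    some line
  else
    none

-- pass 1 step: segmentation state is (finished hunks, current hunk if inside one)
def pvSegStep (st : List (List String) × Option (List String)) (line : String) :
    List (List String) × Option (List String) :=
  if PySem.Str.startswith line "@@" then (st.1 ++ st.2.toList, some [])
  else if PySem.Str.startswith line "diff " then (st.1 ++ st.2.toList, none)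
  else (st.1, st.2.map (fun h => h ++ [line]))

-- pass 2: render one hunk body, or nothing if it yields no lines
def pvMkBlock? (hunk : List String) : Option String :=
  let search := (hunk.map pvSearchLine).filterMap id
  let replace := (hunk.map pvReplaceLine).filterMap id
  if search ≠ [] ∨ replace ≠ [] then
    some ("<<<< SEARCH\n" ++ PySem.Str.join "\n" search ++ "\n====\n"
      ++ PySem.Str.join "\n" replace ++ "\n>>>> REPLACE")
  else none

def convert_diff_to_search_replace_py_alt (diff_text : String) : String :=
  if diff_text == "" || !PySem.Str.isIn "@@" diff_text then diff_text
  else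
    let st := ((PySem.Str.split? diff_text "\n").getD []).foldl pvSegStep ([], none)
    let blocks := (st.1 ++ st.2.toList).filterMap pvMkBlock?
    if blocks ≠ [] then PySem.Str.join "\n\n" blocks else diff_text

-- ===== PRECONDITION & SPEC =====
def Spec_convert_diff_to_search_replace_py (diff_text : String) (out : String) : Prop := out = convert_diff_to_search_replace_py_alt diff_text
instance (diff_text : String) (out : String) : Decidable (Spec_convert_diff_to_search_replace_py diff_text out) := by unfold Spec_convert_diff_to_search_replace_py; infer_instance

-- ===== CLAIM (what is proved, stated in full; the proofs are below) =====
def Claim_equal_convert_diff_to_search_replace_py : Prop := ∀ (diff_text : String), Dom_convert_diff_to_search_replace_py diff_text → Spec_convert_diff_to_search_replace_py diff_text (convert_diff_to_search_replace_py diff_text)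

-- ===== LEMMAS AND PROOFS =====
-- a hunk body line: neither a hunk header nor a 'diff ' terminator
def pvBody (l : String) : Bool :=
  !(PySem.Str.startswith l "@@" || PySem.Str.startswith l "diff ")

-- recursive characterisation of the hunk segmentation
def pvHunksRec : List String → List (List String)
  | [] => []
  | l :: rest =>
    if PySem.Str.startswith l "@@" then
      rest.takeWhile pvBody :: pvHunksRec (rest.dropWhile pvBody)
    else
      pvHunksRec rest
termination_by ls => ls.length
decreasing_by
  · have := List.length_dropWhile_le (p := pvBody) rest; simp; omega
  · simp

theorem pvSeg_spec (ls : List String) (done : List (List String)) (cur : Option (List String)) :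
    (ls.foldl pvSegStep (done, cur)).1 ++ (ls.foldl pvSegStep (done, cur)).2.toList
      = done ++ (match cur with
          | none => pvHunksRec ls
          | some h => (h ++ ls.takeWhile pvBody) :: pvHunksRec (ls.dropWhile pvBody)) := by
  induction ls generalizing done cur with
  | nil => cases cur <;> simp [pvHunksRec]
  | cons l rest ih =>
    by_cases h1 : PySem.Chars.startswith l.toList ['@', '@'] = true
    · have hb : pvBody l = false := by simp [pvBody, h1]
      cases cur <;>
        simp [List.foldl_cons, pvSegStep, h1, ih, pvHunksRec, hb]
    · by_cases h2 : PySem.Chars.startswith l.toList ['d', 'i', 'f', 'f', ' '] = true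
      · have hb : pvBody l = false := by simp [pvBody, h2]
        cases cur <;>
          simp [List.foldl_cons, pvSegStep, h1, h2, ih, pvHunksRec, hb]
      · have hb : pvBody l = true := by simp [pvBody, h1, h2]
        cases cur <;>
          simp [List.foldl_cons, pvSegStep, h1, h2, ih, pvHunksRec, hb]

theorem pvAInner_spec (ls : List String) (s r : List String) :
    pvAInner ls s r
      = (s ++ ((ls.takeWhile pvBody).map pvSearchLine).filterMap id,
         r ++ ((ls.takeWhile pvBody).map pvReplaceLine).filterMap id,
         ls.dropWhile pvBody) := by
  induction ls generalizing s r with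
  | nil => simp [pvAInner]
  | cons l rest ih =>
    simp only [pvAInner]
    split_ifs with hstop c1 c2 c3 c4
    · have hb : pvBody l = false := by
        unfold pvBody; rw [Bool.not_eq_false']; exact hstop
      simp [hb]
    · have hb : pvBody l = true := by
        unfold pvBody; rw [Bool.not_eq_true']; exact Bool.eq_false_iff.mpr hstop
      have hsl : pvSearchLine l = some (PySem.Str.slice l (some 1) none) := by
        unfold pvSearchLine; rw [if_pos c1]
      have hrl : pvReplaceLine l = none := by
        unfold pvReplaceLine; rw [if_pos c1]
      simp [ih, hb, hsl, hrl]
    · have hb : pvBody l = true := by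
        unfold pvBody; rw [Bool.not_eq_true']; exact Bool.eq_false_iff.mpr hstop
      have hsl : pvSearchLine l = none := by
        unfold pvSearchLine; rw [if_neg c1, if_pos c2]
      have hrl : pvReplaceLine l = some (PySem.Str.slice l (some 1) none) := by
        unfold pvReplaceLine; rw [if_neg c1, if_pos c2]
      simp [ih, hb, hsl, hrl]
    · have hb : pvBody l = true := by
        unfold pvBody; rw [Bool.not_eq_true']; exact Bool.eq_false_iff.mpr hstop
      have hsl : pvSearchLine l = some (PySem.Str.slice l (some 1) none) := by
        unfold pvSearchLine; rw [if_neg c1, if_neg c2, if_pos c3]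
      have hrl : pvReplaceLine l = some (PySem.Str.slice l (some 1) none) := by
        unfold pvReplaceLine; rw [if_neg c1, if_neg c2, if_pos c3]
      simp [ih, hb, hsl, hrl]
    · have hb : pvBody l = true := by
        unfold pvBody; rw [Bool.not_eq_true']; exact Bool.eq_false_iff.mpr hstop
      have hsl : pvSearchLine l = some l := by
        unfold pvSearchLine; rw [if_neg c1, if_neg c2, if_neg c3, if_pos c4]
      have hrl : pvReplaceLine l = some l := by
        unfold pvReplaceLine; rw [if_neg c1, if_neg c2, if_neg c3, if_pos c4]
      simp [ih, hb, hsl, hrl]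
    · have hb : pvBody l = true := by
        unfold pvBody; rw [Bool.not_eq_true']; exact Bool.eq_false_iff.mpr hstop
      have hsl : pvSearchLine l = none := by
        unfold pvSearchLine; rw [if_neg c1, if_neg c2, if_neg c3, if_neg c4]
      have hrl : pvReplaceLine l = none := by
        unfold pvReplaceLine; rw [if_neg c1, if_neg c2, if_neg c3, if_neg c4]
      simp [ih, hb, hsl, hrl]

theorem pvAOuter_spec (ls : List String) (blocks : List String) :
    pvAOuter ls blocks = blocks ++ (pvHunksRec ls).filterMap pvMkBlock? := by
  fun_induction pvAOuter ls blocks with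
  | case1 blocks => simp [pvHunksRec]
  | case2 blocks l rest h1 t blocks' ih =>
    rw [ih]
    have ht : t = pvAInner rest [] [] := rfl
    rw [pvAInner_spec] at ht
    have hblk : blocks' = (if t.1 ≠ [] ∨ t.2.1 ≠ [] then
        blocks ++ ["<<<< SEARCH\n" ++ PySem.Str.join "\n" t.1 ++ "\n====\n"
          ++ PySem.Str.join "\n" t.2.1 ++ "\n>>>> REPLACE"] else blocks) := rfl
    have h2 : pvHunksRec (l :: rest)
        = rest.takeWhile pvBody :: pvHunksRec (rest.dropWhile pvBody) := by
      rw [pvHunksRec]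
      simp [show PySem.Chars.startswith l.toList ['@', '@'] = true by simpa using h1]
    rw [h2, List.filterMap_cons, hblk, ht]
    unfold pvMkBlock?
    split_ifs with hcond <;> simp_all
  | case3 blocks l rest h1 ih =>
    rw [ih]
    have h1' : PySem.Chars.startswith l.toList ['@', '@'] = false := by simpa using h1
    simp [pvHunksRec, h1']

-- ===== VERDICT (by name: the statement is the Claim_ definition above) =====
theorem convert_diff_to_search_replace_py_spec : Claim_equal_convert_diff_to_search_replace_py := by
  intro diff_text _
  unfold Spec_convert_diff_to_search_replace_py
  unfold convert_diff_to_search_replace_py convert_diff_to_search_replace_py_alt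
  split_ifs with hguard
  · rfl
  · have h := pvSeg_spec ((PySem.Str.split? diff_text "\n").getD []) [] none
    simp only [List.nil_append] at h
    rw [pvAOuter_spec]
    simp only []
    rw [h, List.nil_append]
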